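-- pv_equiv track=rewrite | github.com/EdoardoBilancia/CODE_HPC | support_scripts/MLfunctions.py | features_extractor_with_pasts_names
-- ===== SOURCE A (Python) =====
-- def features_extractor_with_pasts_names(points_back):
--     names = ["mean","power","max_t","min_t","max_val","min_val","skew","kurt","RMS","var","mean_slope","power_slope","max_t_slope","min_t_slope","max_val_slope","min_val_slope","skew_slope","kurt_slope","RMS_slope","var_slope"]
--     for i in range(points_back):
--         names.append(f"mean_past_{i}")
--     for i in range(points_back):
--         names.append(f"power_past_{i}")
--     for i in range(points_back):
--         names.append(f"max_t_past_{i}")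
--     for i in range(points_back):
--         names.append(f"min_t_past_{i}")
--     for i in range(points_back):
--         names.append(f"max_val_past_{i}")
--     for i in range(points_back):
--         names.append(f"min_val_past_{i}")
--     for i in range(points_back):
--         names.append(f"skew_past_{i}")
--     for i in range(points_back):
--         names.append(f"kurt_past_{i}")
--     for i in range(points_back):
--         names.append(f"RMS_past_{i}")
--     for i in range(points_back):
--         names.append(f"var_past_{i}")
--     for i in range(points_back):
--         names.append(f"mean_slope_past_{i}")
--     for i in range(points_back):
--         names.append(f"power_slope_past_{i}")
--     for i in range(points_back):
--         names.append(f"max_t_slope_past_{i}")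
--     for i in range(points_back):
--         names.append(f"min_t_slope_past_{i}")
--     for i in range(points_back):
--         names.append(f"max_val_slope_past_{i}")
--     for i in range(points_back):
--         names.append(f"min_val_slope_past_{i}")
--     for i in range(points_back):
--         names.append(f"skew_slope_past_{i}")
--     for i in range(points_back):
--         names.append(f"kurt_slope_past_{i}")
--     for i in range(points_back):
--         names.append(f"RMS_slope_past_{i}")
--     for i in range(points_back):
--         names.append(f"var_slope_past_{i}")
--     return names
-- ===== SOURCE B (Python) =====
-- FEATURES = ["mean","power","max_t","min_t","max_val","min_val","skew","kurt","RMS","var",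
--             "mean_slope","power_slope","max_t_slope","min_t_slope","max_val_slope",
--             "min_val_slope","skew_slope","kurt_slope","RMS_slope","var_slope"]
--
-- def features_extractor_with_pasts_names(points_back):
--     # one flat loop; feature and offset recovered arithmetically from the flat index
--     return FEATURES + [f"{FEATURES[k // points_back]}_past_{k % points_back}"
--                        for k in range(20 * points_back)]
-- ===== Notes on version B (the rewrite author's own statement) =====
-- stated objective: alternative
-- what changed: Replaces twenty separate per-feature append loops with a single flat loop over range(20*points_back) that recovers the feature and the past offset arithmetically via k // points_back and k % points_back from a feature table.
import Mathlib
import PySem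

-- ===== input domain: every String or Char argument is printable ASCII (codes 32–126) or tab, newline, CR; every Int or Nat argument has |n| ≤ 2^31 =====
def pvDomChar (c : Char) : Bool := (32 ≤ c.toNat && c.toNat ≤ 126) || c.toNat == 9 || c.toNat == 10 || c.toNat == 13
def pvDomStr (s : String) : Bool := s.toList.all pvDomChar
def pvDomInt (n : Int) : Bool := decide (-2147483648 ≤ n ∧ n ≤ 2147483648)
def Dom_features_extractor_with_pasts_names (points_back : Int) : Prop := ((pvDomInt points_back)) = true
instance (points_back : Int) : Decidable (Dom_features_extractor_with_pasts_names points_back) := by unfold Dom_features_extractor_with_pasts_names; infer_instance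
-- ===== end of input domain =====

-- B replaces A's twenty per-feature append loops by ONE flat loop over range(20*points_back),
-- recovering feature and offset arithmetically (k // points_back, k % points_back); objective: alternative.

-- ===== PORT A =====
def features_extractor_with_pasts_names (points_back : Int) : List String :=
  let names := ["mean","power","max_t","min_t","max_val","min_val","skew","kurt","RMS","var","mean_slope","power_slope","max_t_slope","min_t_slope","max_val_slope","min_val_slope","skew_slope","kurt_slope","RMS_slope","var_slope"]
  let names := (PySem.List.pyRange 0 points_back 1).foldl (fun acc i => acc ++ ["mean_past_" ++ PySem.Int.toStr i]) names
  let names := (PySem.List.pyRange 0 points_back 1).foldl (fun acc i => acc ++ ["power_past_" ++ PySem.Int.toStr i]) names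
  let names := (PySem.List.pyRange 0 points_back 1).foldl (fun acc i => acc ++ ["max_t_past_" ++ PySem.Int.toStr i]) names
  let names := (PySem.List.pyRange 0 points_back 1).foldl (fun acc i => acc ++ ["min_t_past_" ++ PySem.Int.toStr i]) names
  let names := (PySem.List.pyRange 0 points_back 1).foldl (fun acc i => acc ++ ["max_val_past_" ++ PySem.Int.toStr i]) names
  let names := (PySem.List.pyRange 0 points_back 1).foldl (fun acc i => acc ++ ["min_val_past_" ++ PySem.Int.toStr i]) names
  let names := (PySem.List.pyRange 0 points_back 1).foldl (fun acc i => acc ++ ["skew_past_" ++ PySem.Int.toStr i]) names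
  let names := (PySem.List.pyRange 0 points_back 1).foldl (fun acc i => acc ++ ["kurt_past_" ++ PySem.Int.toStr i]) names
  let names := (PySem.List.pyRange 0 points_back 1).foldl (fun acc i => acc ++ ["RMS_past_" ++ PySem.Int.toStr i]) names
  let names := (PySem.List.pyRange 0 points_back 1).foldl (fun acc i => acc ++ ["var_past_" ++ PySem.Int.toStr i]) names
  let names := (PySem.List.pyRange 0 points_back 1).foldl (fun acc i => acc ++ ["mean_slope_past_" ++ PySem.Int.toStr i]) names
  let names := (PySem.List.pyRange 0 points_back 1).foldl (fun acc i => acc ++ ["power_slope_past_" ++ PySem.Int.toStr i]) names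
  let names := (PySem.List.pyRange 0 points_back 1).foldl (fun acc i => acc ++ ["max_t_slope_past_" ++ PySem.Int.toStr i]) names
  let names := (PySem.List.pyRange 0 points_back 1).foldl (fun acc i => acc ++ ["min_t_slope_past_" ++ PySem.Int.toStr i]) names
  let names := (PySem.List.pyRange 0 points_back 1).foldl (fun acc i => acc ++ ["max_val_slope_past_" ++ PySem.Int.toStr i]) names
  let names := (PySem.List.pyRange 0 points_back 1).foldl (fun acc i => acc ++ ["min_val_slope_past_" ++ PySem.Int.toStr i]) names
  let names := (PySem.List.pyRange 0 points_back 1).foldl (fun acc i => acc ++ ["skew_slope_past_" ++ PySem.Int.toStr i]) names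
  let names := (PySem.List.pyRange 0 points_back 1).foldl (fun acc i => acc ++ ["kurt_slope_past_" ++ PySem.Int.toStr i]) names
  let names := (PySem.List.pyRange 0 points_back 1).foldl (fun acc i => acc ++ ["RMS_slope_past_" ++ PySem.Int.toStr i]) names
  let names := (PySem.List.pyRange 0 points_back 1).foldl (fun acc i => acc ++ ["var_slope_past_" ++ PySem.Int.toStr i]) names
  names

-- ===== PORT B =====
def pvFEATURES : List String := ["mean","power","max_t","min_t","max_val","min_val","skew","kurt","RMS","var","mean_slope","power_slope","max_t_slope","min_t_slope","max_val_slope","min_val_slope","skew_slope","kurt_slope","RMS_slope","var_slope"]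

-- FEATURES[k // points_back] is always in range (0 ≤ k//pb < 20 whenever the loop runs), so the
-- total indexing form pyGetD is exact here.
def features_extractor_with_pasts_names_alt (points_back : Int) : List String :=
  pvFEATURES ++ (PySem.List.pyRange 0 (20 * points_back) 1).map (fun k =>
    PySem.List.pyGetD pvFEATURES (PySem.Int.floordiv k points_back) "" ++ "_past_" ++
      PySem.Int.toStr (PySem.Int.mod k points_back))

-- ===== PRECONDITION & SPEC =====
def Spec_features_extractor_with_pasts_names (points_back : Int) (out : List String) : Prop := out = features_extractor_with_pasts_names_alt points_back
instance (points_back : Int) (out : List String) : Decidable (Spec_features_extractor_with_pasts_names points_back out) := by unfold Spec_features_extractor_with_pasts_names; infer_instance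

-- ===== CLAIM (what is proved, stated in full; the proofs are below) =====
def Claim_equal_features_extractor_with_pasts_names : Prop := ∀ (points_back : Int), Dom_features_extractor_with_pasts_names points_back → Spec_features_extractor_with_pasts_names points_back (features_extractor_with_pasts_names points_back)

-- ===== LEMMAS AND PROOFS =====

-- flat index decomposition: one loop of fs.length * n steps, reading fs.getD (k/n) and k%n,
-- equals the nested iteration (feature-major).
theorem pv_flat_eq_flatMap (h : String → Nat → String) :
    ∀ (fs : List String) (n : Nat), 0 < n →
      (List.range (fs.length * n)).map (fun k => h (fs.getD (k / n) "") (k % n))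
        = fs.flatMap (fun f => (List.range n).map (fun i => h f i)) := by
  intro fs
  induction fs with
  | nil => intro n hn; simp
  | cons f t ih =>
    intro n hn
    have hlen : (f :: t).length * n = n + t.length * n := by
      simp [List.length_cons, Nat.succ_mul, Nat.add_comm]
    rw [hlen, List.range_add, List.map_append, List.map_map]
    congr 1
    · apply List.map_congr_left
      intro k hk
      have hk' : k < n := List.mem_range.mp hk
      simp [Nat.div_eq_of_lt hk', Nat.mod_eq_of_lt hk']
    · have : ((fun k => h ((f :: t).getD (k / n) "") (k % n)) ∘ fun x => n + x)
          = fun k => h (t.getD (k / n) "") (k % n) := by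
        funext k
        have hdiv : (n + k) / n = k / n + 1 := by
          rw [Nat.add_comm, Nat.add_div_right _ hn]
        have hmod : (n + k) % n = k % n := Nat.add_mod_left n k
        simp [Function.comp, hdiv, hmod]
      rw [this, ih n hn, List.flatMap_def]

-- ===== VERDICT (by name: the statement is the Claim_ definition above) =====
theorem features_extractor_with_pasts_names_spec : Claim_equal_features_extractor_with_pasts_names := by
  intro pb _
  unfold Spec_features_extractor_with_pasts_names features_extractor_with_pasts_names features_extractor_with_pasts_names_alt
  rcases (by omega : pb ≤ 0 ∨ 0 < pb) with hpb | hpb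
  · rw [PySem.List.pyRange_one_eq_nil hpb, PySem.List.pyRange_one_eq_nil (by omega : (20:Int) * pb ≤ 0)]
    simp [pvFEATURES]
  · obtain ⟨n, hn⟩ : ∃ n : ℕ, pb = (n : Int) := ⟨pb.toNat, by omega⟩
    have hnpos : 0 < n := by omega
    subst hn
    have h20 : ((20 : Int) * n - 0).toNat = 20 * n := by omega
    have h1 : ((n : Int) - 0).toNat = n := by omega
    simp only [PySem.List.foldl_append_singleton_eq_map, PySem.List.pyRange_one, h20, h1,
      List.map_map, List.append_assoc]
    congr 1
    have hmapped :
        (List.range (20 * n)).map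
          ((fun k => PySem.List.pyGetD pvFEATURES (PySem.Int.floordiv k (n : Int)) "" ++ "_past_" ++
              PySem.Int.toStr (PySem.Int.mod k (n : Int))) ∘ fun k : ℕ => (0 : Int) + (k : Int))
          = (List.range (20 * n)).map
              (fun k => (fun f i => f ++ "_past_" ++ PySem.Int.toStr ((i : Nat) : Int))
                 (pvFEATURES.getD (k / n) "") (k % n)) := by
      apply List.map_congr_left
      intro k _
      simp only [Function.comp_apply, zero_add, PySem.Int.floordiv_natCast,
        PySem.Int.mod_natCast, PySem.List.pyGetD_natCast]
    have hflat := pv_flat_eq_flatMap (fun f i => f ++ "_past_" ++ PySem.Int.toStr ((i : Nat) : Int))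
      pvFEATURES n hnpos
    have hlenF : pvFEATURES.length = 20 := by decide
    rw [hmapped]
    rw [hlenF] at hflat
    rw [hflat]
    simp [pvFEATURES, Function.comp_def]
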